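-- pv_equiv track=rewrite | github.com/yoonjung1205/ALGORITHM | PROGRAMMERS/조이스틱.py | solution
-- ===== SOURCE A (Python) =====
-- def solution(name):
--     answer = 0
--
--     def up_down(ch):
--         up = abs(65 - ord(ch))
--         down = abs(90 - ord(ch) + 1)
--         return min(up, down)
--
--     index = 0
--     min_move = len(name) - 1
--
--     while index < len(name):
--         answer += up_down(name[index])
--         start = index + 1
--         # 연속된 A의 마지막 인덱스 start
--         while start < len(name) and name[start] == 'A':
--             start += 1
--
--         # 기존, 연속된 A의 왼쪽시작 방식, 연속된 A의 오른쪽시작 방식 비교 및 갱신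
--         min_move = min([min_move, 2 * index + len(name) - start, index + 2 * (len(name) - start)])
--         index += 1
--     answer += min_move
--
--     return answer
-- ===== SOURCE B (Python) =====
-- def solution(name):
--     n = len(name)
--     total = 0
--     for c in name:
--         total += min(abs(ord(c) - 65), abs(91 - ord(c)))
--     min_move = n - 1
--     j = n  # next index >= i+1 whose letter needs typing (n if none)
--     i = n - 1
--     while i >= 0:
--         min_move = min(min_move, 2 * i + n - j, i + 2 * (n - j))
--         if name[i] != 'A':
--             j = i
--         i -= 1
--     return total + min_move
-- ===== Notes on version B (the rewrite author's own statement) =====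
-- stated objective: faster
-- what changed: A rescans the whole following run of skip-letters from scratch at every index (quadratic); B makes one backward sweep that carries the index of the next non-skip letter, so each position is visited once.
import Mathlib
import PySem

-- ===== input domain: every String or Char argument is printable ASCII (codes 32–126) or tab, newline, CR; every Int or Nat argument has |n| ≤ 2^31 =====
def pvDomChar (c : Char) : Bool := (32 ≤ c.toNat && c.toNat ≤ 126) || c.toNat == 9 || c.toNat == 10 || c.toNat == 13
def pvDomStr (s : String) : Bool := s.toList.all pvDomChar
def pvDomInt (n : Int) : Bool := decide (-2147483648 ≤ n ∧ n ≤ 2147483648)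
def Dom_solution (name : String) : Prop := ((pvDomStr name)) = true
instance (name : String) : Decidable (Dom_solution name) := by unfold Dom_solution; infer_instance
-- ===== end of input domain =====

-- B replaces A's quadratic inner rescans of the skip-letter run by one backward sweep
-- that carries the next non-skip index, giving a single O(n) pass (objective: faster).

-- ===== PORT A =====
-- up_down(ch)
def upDown (ch : Char) : Int :=
  min |(65 : Int) - ch.toNat| |(90 : Int) - ch.toNat + 1|

-- inner scanning while-loop of A (`start` skips past the run after `index`)
def scanA (cs : List Char) (start : Nat) : Nat :=
  if h : start < cs.length then
    if cs[start] = 'A' then scanA cs (start + 1) else start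
  else start
termination_by cs.length - start

-- outer `while index < len(name)` loop of A
def loopA (cs : List Char) (index : Nat) (answer minMove : Int) : Int :=
  if h : index < cs.length then
    let answer := answer + upDown cs[index]
    let start := scanA cs (index + 1)
    let minMove := min (min minMove (2 * (index : Int) + cs.length - start))
                       ((index : Int) + 2 * ((cs.length : Int) - start))
    loopA cs (index + 1) answer minMove
  else answer + minMove
termination_by cs.length - index

def solution (name : String) : Int :=
  loopA name.toList 0 0 ((name.toList.length : Int) - 1)

-- ===== PORT B =====
-- backward `while i >= 0` loop of B; k = i + 1 (so i = k - 1), j = next non-skip index ≥ i+1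
def loopB (cs : List Char) (k : Nat) (minMove j : Int) : Int :=
  match k with
  | 0 => minMove
  | k + 1 =>
    let n : Int := cs.length
    let i : Int := k
    let minMove := min (min minMove (2 * i + n - j)) (i + 2 * (n - j))
    let j := if cs[k]? ≠ some 'A' then i else j
    loopB cs k minMove j

def solution_alt (name : String) : Int :=
  let cs := name.toList
  let n := cs.length
  let total := cs.foldl (fun t c => t + min |(c.toNat : Int) - 65| |(91 : Int) - c.toNat|) 0
  total + loopB cs n ((n : Int) - 1) (n : Int)

-- ===== PRECONDITION & SPEC =====
def Spec_solution (name : String) (out : Int) : Prop := out = solution_alt name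
instance (name : String) (out : Int) : Decidable (Spec_solution name out) := by unfold Spec_solution; infer_instance

-- ===== CLAIM (what is proved, stated in full; the proofs are below) =====
def Claim_equal_solution : Prop := ∀ (name : String), Dom_solution name → Spec_solution name (solution name)

-- ===== LEMMAS AND PROOFS =====

-- candidate value contributed by position i (both programs compute this pair of options)
def cand (cs : List Char) (i : Nat) : Int :=
  min (2 * (i : Int) + cs.length - scanA cs (i + 1))
      ((i : Int) + 2 * ((cs.length : Int) - scanA cs (i + 1)))

def sumUD (cs : List Char) : Int := (cs.map upDown).sum

lemma foldl_min_out (l : List Int) : ∀ b c : Int,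
    l.foldl min (min b c) = min (l.foldl min b) c := by
  induction l with
  | nil => intro b c; simp
  | cons d l ih =>
    intro b c
    simp only [List.foldl_cons]
    rw [show min (min b c) d = min (min b d) c by
          rw [min_assoc, min_comm c d, ← min_assoc], ih]

lemma foldl_min_reverse (l : List Int) (b : Int) :
    l.reverse.foldl min b = l.foldl min b := by
  induction l generalizing b with
  | nil => rfl
  | cons c l ih =>
    simp only [List.reverse_cons, List.foldl_append, List.foldl_cons, List.foldl_nil, ih]
    rw [← foldl_min_out]

lemma loopA_eq (cs : List Char) : ∀ (m i : Nat) (ans mm : Int), cs.length - i = m →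
    loopA cs i ans mm =
      ans + sumUD (cs.drop i) +
        (((List.range' i (cs.length - i)).map (cand cs)).foldl min mm) := by
  intro m
  induction m with
  | zero =>
    intro i ans mm h
    have hi : ¬ i < cs.length := by omega
    rw [loopA]
    rw [h]
    simp [hi, List.drop_eq_nil_of_le (show cs.length ≤ i by omega), sumUD]
  | succ m ih =>
    intro i ans mm h
    have hi : i < cs.length := by omega
    rw [loopA]
    simp only [hi, dif_pos]
    rw [ih (i + 1) _ _ (by omega)]
    have hdrop : cs.drop i = cs[i] :: cs.drop (i + 1) := List.drop_eq_getElem_cons hi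
    have hrange : List.range' i (cs.length - i) = i :: List.range' (i + 1) (cs.length - (i + 1)) := by
      have h1 : cs.length - i = (cs.length - (i + 1)) + 1 := by omega
      rw [h1, List.range'_succ]
    rw [hdrop, hrange]
    simp only [List.map_cons, List.foldl_cons, sumUD, List.sum_cons]
    have hmin : min (min mm (2 * (i : Int) + cs.length - scanA cs (i + 1)))
             ((i : Int) + 2 * ((cs.length : Int) - scanA cs (i + 1))) = min mm (cand cs i) := by
      rw [cand, min_assoc]
    rw [hmin]
    ring

lemma scanA_of_not_lt (cs : List Char) (s : Nat) (h : ¬ s < cs.length) : scanA cs s = s := by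
  rw [scanA]; simp [h]

lemma loopB_eq (cs : List Char) : ∀ (k : Nat), k ≤ cs.length → ∀ (mm : Int),
    loopB cs k mm ((scanA cs k : Nat) : Int) =
      (((List.range k).reverse.map (cand cs)).foldl min mm) := by
  intro k
  induction k with
  | zero => intro _ mm; simp [loopB]
  | succ k ih =>
    intro hk mm
    have hklt : k < cs.length := by omega
    rw [loopB]
    simp only [List.getElem?_eq_getElem hklt]
    have hs : scanA cs k = if cs[k] = 'A' then scanA cs (k + 1) else k := by
      rw [scanA]; simp [hklt]
    have hj : (if (some cs[k] ≠ some 'A') then ((k : Nat) : Int) else ((scanA cs (k + 1) : Nat) : Int))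
        = ((scanA cs k : Nat) : Int) := by
      rw [hs]; split_ifs with h1 h2 <;> simp_all
    have hcand : min (min mm (2 * (k : Int) + cs.length - scanA cs (k + 1)))
        ((k : Int) + 2 * ((cs.length : Int) - scanA cs (k + 1))) = min mm (cand cs k) := by
      rw [cand, min_assoc]
    rw [hj, hcand]
    rw [ih (by omega) (min mm (cand cs k))]
    rw [List.range_succ]
    simp

lemma total_eq (cs : List Char) : ∀ t : Int,
    cs.foldl (fun t c => t + min |(c.toNat : Int) - 65| |(91 : Int) - c.toNat|) t
      = t + sumUD cs := by
  induction cs with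
  | nil => intro t; simp [sumUD]
  | cons c cs ih =>
    intro t
    simp only [List.foldl_cons, ih, sumUD, List.map_cons, List.sum_cons]
    have hud : min |(c.toNat : Int) - 65| |(91 : Int) - c.toNat| = upDown c := by
      rw [upDown, abs_sub_comm]
      have h91 : (91 : Int) - c.toNat = 90 - c.toNat + 1 := by ring
      rw [h91]
    rw [hud]; ring

-- ===== VERDICT (by name: the statement is the Claim_ definition above) =====
theorem solution_spec : Claim_equal_solution := by
  intro name _
  unfold Spec_solution solution solution_alt
  dsimp only
  rw [loopA_eq name.toList (name.toList.length - 0) 0 0 _ rfl]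
  rw [total_eq name.toList 0]
  have hscan : ((scanA name.toList name.toList.length : Nat) : Int)
      = (name.toList.length : Int) := by
    rw [scanA_of_not_lt _ _ (by omega)]
  rw [← hscan, loopB_eq _ _ (le_refl _)]
  rw [List.map_reverse, foldl_min_reverse]
  simp [← List.range_eq_range']
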